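-- pv_equiv track=rewrite | github.com/yurachampion/tacohamingway | scripts/merge_content_into_html.py | get_lyrics_block_bounds
-- ===== SOURCE A (Python) =====
-- def get_lyrics_block_bounds(html):
--     """Возвращает (lyrics_start, lyrics_end) для div#lyricsPolish."""
--     lyrics_start = html.find('id="lyricsPolish">')
--     if lyrics_start == -1:
--         return None, None
--     lyrics_start += len('id="lyricsPolish">')
--     pos = lyrics_start
--     depth = 1
--     lyrics_end = None
--     while pos < len(html):
--         next_close = html.find("</div>", pos)
--         next_open = html.find("<div", pos)
--         if next_close == -1:
--             break
--         use_close = next_open == -1 or next_close < next_open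
--         if use_close:
--             depth -= 1
--             pos = next_close + 6
--             if depth == 0:
--                 lyrics_end = next_close
--                 break
--         else:
--             if next_open + 5 <= len(html) and html[next_open : next_open + 5] != "</div":
--                 depth += 1
--             pos = html.find(">", next_open) + 1 if html.find(">", next_open) != -1 else next_open + 5
--     return lyrics_start, lyrics_end
-- ===== SOURCE B (Python) =====
-- def get_lyrics_block_bounds(html):
--     """Возвращает (lyrics_start, lyrics_end) для div#lyricsPolish."""
--     marker = 'id="lyricsPolish">'
--     i = html.find(marker)
--     if i == -1:
--         return None, None
--     lyrics_start = i + len(marker)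
--     n = len(html)
--     # linear pre-scan: every close/open tag position (in order), every '>' position
--     events = []
--     for j in range(n):
--         if html[j:j + 6] == "</div>":
--             events.append((j, True))
--         elif html[j:j + 4] == "<div":
--             events.append((j, False))
--     gts = [j for j in range(n) if html[j] == ">"]
--     # one pass over the events with a depth counter
--     pos = lyrics_start
--     depth = 1
--     lyrics_end = None
--     g = 0
--     for p, is_close in events:
--         if p < pos:
--             continue
--         if is_close:
--             depth -= 1
--             if depth == 0:
--                 lyrics_end = p
--                 break
--             pos = p + 6
--         else:
--             depth += 1
--             while g < len(gts) and gts[g] < p: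
--                 g += 1
--             pos = gts[g] + 1 if g < len(gts) else p + 5
--     return lyrics_start, lyrics_end
-- ===== Notes on version B (the rewrite author's own statement) =====
-- stated objective: alternative
-- what changed: A repeatedly re-scans the string with html.find for the next close tag, open tag and tag-end bracket from the current position (quadratic in the worst case); B pre-scans the string once to collect all close-tag, open-tag and tag-end-bracket positions, then resolves the matching close in a single pass over that event list with a depth counter and forward-only pointers.
import Mathlib
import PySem

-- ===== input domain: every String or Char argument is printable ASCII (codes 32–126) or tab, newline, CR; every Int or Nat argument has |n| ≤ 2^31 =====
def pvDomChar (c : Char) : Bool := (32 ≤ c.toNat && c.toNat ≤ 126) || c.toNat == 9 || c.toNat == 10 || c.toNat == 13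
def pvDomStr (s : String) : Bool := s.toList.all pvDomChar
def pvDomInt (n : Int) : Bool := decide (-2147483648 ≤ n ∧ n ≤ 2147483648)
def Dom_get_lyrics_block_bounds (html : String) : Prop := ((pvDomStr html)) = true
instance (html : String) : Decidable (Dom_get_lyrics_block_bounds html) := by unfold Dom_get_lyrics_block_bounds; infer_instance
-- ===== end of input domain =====

-- B replaces A's repeated html.find re-scans (quadratic in the worst case) by one linear
-- pre-scan collecting all tag and angle-bracket positions followed by a single pass with a depth counter.


-- ===== PORT A =====
def pvMarker : List Char := "id=\"lyricsPolish\">".toList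
def pvCloseTag : List Char := "</div>".toList
def pvOpenTag : List Char := "<div".toList

-- A's while-loop: pos strictly grows every iteration, so fuel = len+1 never runs out
def pvLoopA (html : List Char) : Nat → Int → Int → Option Int
  | 0, _, _ => none
  | fuel + 1, pos, depth =>
    if pos < (html.length : Int) then
      let nextClose := PySem.Chars.findFrom html pvCloseTag pos
      let nextOpen := PySem.Chars.findFrom html pvOpenTag pos
      if nextClose = -1 then none
      else if nextOpen = -1 ∨ nextClose < nextOpen then
        if depth - 1 = 0 then some nextClose
        else pvLoopA html fuel (nextClose + 6) (depth - 1)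
      else
        let depth' := if nextOpen + 5 ≤ (html.length : Int) ∧
            PySem.List.slice html (some nextOpen) (some (nextOpen + 5)) ≠ "</div".toList
          then depth + 1 else depth
        let g := PySem.Chars.findFrom html ['>'] nextOpen
        let pos' := if g ≠ -1 then g + 1 else nextOpen + 5
        pvLoopA html fuel pos' depth'
    else none

def get_lyrics_block_bounds (html : String) : Option Int × Option Int :=
  let s := html.toList
  let f := PySem.Chars.find s pvMarker
  if f = -1 then (none, none)
  else
    let lyricsStart := f + 18
    (some lyricsStart, pvLoopA s (s.length + 1) lyricsStart 1)

-- ===== PORT B =====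
-- linear pre-scan: every close/open tag position (in order), every closing-bracket position
def pvEvents (html : List Char) : List (Int × Bool) :=
  (PySem.List.pyRange 0 (html.length : Int)).filterMap (fun j =>
    if PySem.List.slice html (some j) (some (j + 6)) = "</div>".toList then some (j, true)
    else if PySem.List.slice html (some j) (some (j + 4)) = "<div".toList then some (j, false)
    else none)

def pvGts (html : List Char) : List Int :=
  (PySem.List.pyRange 0 (html.length : Int)).filter (fun j => PySem.List.pyGet? html j = some '>')

-- one pass over the events with a depth counter (the g pointer = consuming gts)
def pvLoopB (gts : List Int) : Int → Int → List (Int × Bool) → Option Int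
  | _, _, [] => none
  | pos, depth, (p, isClose) :: rest =>
    if p < pos then pvLoopB gts pos depth rest
    else if isClose then
      if depth - 1 = 0 then some p
      else pvLoopB gts (p + 6) (depth - 1) rest
    else
      let gts' := gts.dropWhile (fun g => g < p)
      let pos' := match gts' with
        | g :: _ => g + 1
        | [] => p + 5
      pvLoopB gts' pos' (depth + 1) rest

def get_lyrics_block_bounds_alt (html : String) : Option Int × Option Int :=
  let s := html.toList
  let i := PySem.Chars.find s "id=\"lyricsPolish\">".toList
  if i = -1 then (none, none)
  else
    let lyricsStart := i + 18
    (some lyricsStart, pvLoopB (pvGts s) lyricsStart 1 (pvEvents s))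

-- ===== PRECONDITION & SPEC =====
def Spec_get_lyrics_block_bounds (html : String) (out : Option Int × Option Int) : Prop := out = get_lyrics_block_bounds_alt html
instance (html : String) (out : Option Int × Option Int) : Decidable (Spec_get_lyrics_block_bounds html out) := by unfold Spec_get_lyrics_block_bounds; infer_instance

-- ===== CLAIM (what is proved, stated in full; the proofs are below) =====
def Claim_equal_get_lyrics_block_bounds : Prop := ∀ (html : String), Dom_get_lyrics_block_bounds html → Spec_get_lyrics_block_bounds html (get_lyrics_block_bounds html)

-- ===== LEMMAS AND PROOFS =====

-- occurrence predicates: a close tag / open tag / '>' sits at index j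
def PvC (s : List Char) (j : Nat) : Prop := pvCloseTag <+: s.drop j
def PvO (s : List Char) (j : Nat) : Prop := pvOpenTag <+: s.drop j
def PvG (s : List Char) (j : Nat) : Prop := ['>'] <+: s.drop j

-- generic dropWhile facts
lemma pv_mem_dropWhile {α : Type} (p : α → Bool) (l : List α) (x : α)
    (h : x ∈ l) (hx : ¬ p x = true) : x ∈ l.dropWhile p := by
  rcases (List.takeWhile_append_dropWhile (p := p) (l := l)).symm ▸ h with h'
  rcases List.mem_append.1 h' with h1 | h1
  · exact absurd (List.mem_takeWhile_imp h1) hx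
  · exact h1

lemma pv_head_dropWhile {α : Type} (p : α → Bool) (x : α) (l t : List α)
    (h : l.dropWhile p = x :: t) : ¬ p x = true := by
  induction l with
  | nil => simp [List.dropWhile] at h
  | cons a l ih =>
    rw [List.dropWhile_cons] at h
    split at h
    · exact ih h
    · cases h; assumption

lemma pv_dropWhile_dropWhile (l : List Int) (b p : Int) (h : b ≤ p) :
    (l.dropWhile (fun g => g < b)).dropWhile (fun g => g < p) = l.dropWhile (fun g => g < p) := by
  conv_rhs => rw [← List.takeWhile_append_dropWhile (p := fun g => decide (g < b)) (l := l)]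
  rw [List.dropWhile_append]
  have hnil : (List.dropWhile (fun g => decide (g < p)) (List.takeWhile (fun g => decide (g < b)) l)) = [] := by
    rw [List.dropWhile_eq_nil_iff]
    intro x hx
    have := List.mem_takeWhile_imp hx
    simp at this ⊢; omega
  simp [hnil]

-- slice ↔ prefix bridges
lemma pv_slice6_iff (s : List Char) (j : Nat) :
    PySem.List.slice s (some (j : Int)) (some ((j : Int) + 6)) = pvCloseTag ↔ PvC s j := by
  have h6 : ((6 : Int)) = ((6 : Nat) : Int) := by norm_num
  rw [h6, PySem.List.slice_natCast_add]
  unfold PvC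
  rw [List.prefix_iff_eq_take]
  have : pvCloseTag.length = 6 := rfl
  rw [this]
  exact eq_comm

lemma pv_slice4_iff (s : List Char) (j : Nat) :
    PySem.List.slice s (some (j : Int)) (some ((j : Int) + 4)) = pvOpenTag ↔ PvO s j := by
  have h4 : ((4 : Int)) = ((4 : Nat) : Int) := by norm_num
  rw [h4, PySem.List.slice_natCast_add]
  unfold PvO
  rw [List.prefix_iff_eq_take]
  have : pvOpenTag.length = 4 := rfl
  rw [this]
  exact eq_comm

-- occurrences fit inside the string / are mutually exclusive
lemma pv_PvC_lt (s : List Char) (j : Nat) (h : PvC s j) : j + 6 ≤ s.length := by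
  have := h.length_le
  simp [List.length_drop] at this
  have h6 : pvCloseTag.length = 6 := rfl
  omega

lemma pv_PvO_lt (s : List Char) (j : Nat) (h : PvO s j) : j + 4 ≤ s.length := by
  have := h.length_le
  simp [List.length_drop] at this
  have h4 : pvOpenTag.length = 4 := rfl
  omega

lemma pv_PvG_lt (s : List Char) (j : Nat) (h : PvG s j) : j + 1 ≤ s.length := by
  have := h.length_le
  simp [List.length_drop] at this
  omega

lemma pv_not_PvC_PvO (s : List Char) (j : Nat) (hc : PvC s j) (ho : PvO s j) : False := by
  obtain ⟨t, ht⟩ := hc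
  obtain ⟨u, hu⟩ := ho
  have h := ht.trans hu.symm
  have hc' : pvCloseTag = ['<','/','d','i','v','>'] := rfl
  have ho' : pvOpenTag = ['<','d','i','v'] := rfl
  rw [hc', ho'] at h
  simp at h

-- A's depth guard on an open tag never sees "</div"
lemma pv_guard (s : List Char) (j : Nat) (h : PvO s j) :
    PySem.List.slice s (some (j : Int)) (some ((j : Int) + 5)) ≠ "</div".toList := by
  obtain ⟨t, ht⟩ := h
  have h5 : ((5 : Int)) = ((5 : Nat) : Int) := by norm_num
  rw [h5, PySem.List.slice_natCast_add, ← ht]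
  rw [show pvOpenTag = ['<','d','i','v'] from rfl,
      show "</div".toList = ['<','/','d','i','v'] from rfl]
  intro hEq
  simp [List.take_succ_cons] at hEq

-- events / gts membership and order
lemma pv_mem_events (s : List Char) (p : Int) (k : Bool) :
    (p, k) ∈ pvEvents s ↔ ∃ j : Nat, p = (j : Int) ∧ j < s.length ∧
      ((k = true ∧ PvC s j) ∨ (k = false ∧ ¬ PvC s j ∧ PvO s j)) := by
  have e6 : "</div>".toList = pvCloseTag := rfl
  have e4 : "<div".toList = pvOpenTag := rfl
  unfold pvEvents
  rw [List.mem_filterMap]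
  constructor
  · rintro ⟨a, ha, hfa⟩
    rw [PySem.List.mem_pyRange_one] at ha
    obtain ⟨ha0, halt⟩ := ha
    lift a to ℕ using ha0 with j
    rw [e6, e4] at hfa
    refine ⟨j, ?_, by omega, ?_⟩
    · split_ifs at hfa <;> simp_all
    · split_ifs at hfa with h1 h2
      · simp only [Option.some.injEq, Prod.mk.injEq] at hfa
        exact Or.inl ⟨hfa.2.symm, (pv_slice6_iff s j).1 h1⟩
      · simp only [Option.some.injEq, Prod.mk.injEq] at hfa
        exact Or.inr ⟨hfa.2.symm, fun hc => h1 ((pv_slice6_iff s j).2 hc), (pv_slice4_iff s j).1 h2⟩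
  · rintro ⟨j, rfl, hj, hk⟩
    refine ⟨(j : Int), by rw [PySem.List.mem_pyRange_one]; omega, ?_⟩
    rw [e6, e4]
    rcases hk with ⟨rfl, hc⟩ | ⟨rfl, hnc, ho⟩
    · rw [if_pos ((pv_slice6_iff s j).2 hc)]
    · rw [if_neg (fun h => hnc ((pv_slice6_iff s j).1 h)), if_pos ((pv_slice4_iff s j).2 ho)]

lemma pv_singleton_prefix_drop (s : List Char) (j : Nat) :
    PvG s j ↔ PySem.List.pyGet? s (j : Int) = some '>' := by
  unfold PvG
  rw [PySem.List.pyGet?_natCast, ← List.head?_drop]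
  cases s.drop j with
  | nil => simp
  | cons a t => simp [List.prefix_iff_eq_take, List.take, eq_comm]

lemma pv_mem_gts (s : List Char) (g : Int) :
    g ∈ pvGts s ↔ ∃ j : Nat, g = (j : Int) ∧ j < s.length ∧ PvG s j := by
  unfold pvGts
  rw [List.mem_filter]
  constructor
  · rintro ⟨hmem, hget⟩
    rw [PySem.List.mem_pyRange_one] at hmem
    obtain ⟨h0, hlt⟩ := hmem
    lift g to ℕ using h0 with j
    refine ⟨j, rfl, by omega, ?_⟩
    rw [pv_singleton_prefix_drop]
    simpa using hget
  · rintro ⟨j, rfl, hj, hg⟩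
    rw [pv_singleton_prefix_drop] at hg
    exact ⟨by rw [PySem.List.mem_pyRange_one]; omega, by simpa using hg⟩

lemma pv_events_sorted (s : List Char) : (pvEvents s).Pairwise (fun a b => a.1 < b.1) := by
  unfold pvEvents
  rw [List.pairwise_filterMap]
  apply List.Pairwise.imp ?_ (PySem.List.pairwise_lt_pyRange_one 0 (s.length : Int))
  intro a a' hlt b hb b' hb'
  have hfst : ∀ (x : Int) (y : Int × Bool),
      (if PySem.List.slice s (some x) (some (x + 6)) = "</div>".toList then some (x, true)
       else if PySem.List.slice s (some x) (some (x + 4)) = "<div".toList then some (x, false)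
       else none) = some y → y.1 = x := by
    intro x y h
    split_ifs at h
    · cases Option.some.inj h; rfl
    · cases Option.some.inj h; rfl
  rw [hfst a b hb, hfst a' b' hb']
  exact hlt

lemma pv_gts_sorted (s : List Char) : (pvGts s).Pairwise (fun a b => a < b) := by
  unfold pvGts
  exact (PySem.List.pairwise_lt_pyRange_one 0 (s.length : Int)).filter _

-- loopB skips events before pos
lemma pv_loopB_skip (gts : List Int) (pos depth : Int) (evts : List (Int × Bool)) :
    pvLoopB gts pos depth evts = pvLoopB gts pos depth (evts.dropWhile (fun e => e.1 < pos)) := by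
  induction evts with
  | nil => rfl
  | cons e rest ih =>
    obtain ⟨p, c⟩ := e
    rw [List.dropWhile_cons]
    by_cases hp : p < pos
    · simp only [hp, decide_true, if_pos]
      rw [← ih]
      simp [pvLoopB, hp]
    · simp [hp]

-- loopB returns none when no close event at or beyond pos remains
lemma pv_loopB_none (evts : List (Int × Bool)) :
    ∀ (gts : List Int) (pos depth : Int),
    (∀ e ∈ evts, e.2 = true → e.1 < pos) → pvLoopB gts pos depth evts = none := by
  induction evts with
  | nil => intro _ _ _ _; rfl
  | cons e rest ih =>
    intro gts pos depth H
    obtain ⟨p, c⟩ := e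
    by_cases hp : p < pos
    · simp only [pvLoopB, if_pos hp]
      exact ih gts pos depth (fun e he => H e (List.mem_cons_of_mem _ he))
    · cases c with
      | true => exact absurd (H (p, true) List.mem_cons_self rfl) hp
      | false =>
        simp only [pvLoopB, if_neg hp, if_neg (by simp : ¬ (false = true))]
        have hpos' : pos ≤ (match gts.dropWhile (fun g => g < p) with
            | g :: _ => g + 1 | [] => p + 5) := by
          cases hg : gts.dropWhile (fun g => g < p) with
          | nil =>
            show pos ≤ p + 5
            omega
          | cons g t =>
            show pos ≤ g + 1
            have := pv_head_dropWhile _ g _ _ hg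
            simp at this
            omega
        apply ih
        intro e he hc
        have := H e (List.mem_cons_of_mem _ he) hc
        omega

-- findFrom ↔ first matching position at or beyond pos
lemma pv_findFrom_none (s sub : List Char) (pos : Int) (h0 : 0 ≤ pos) (hlen : pos ≤ (s.length : Int)) :
    PySem.Chars.findFrom s sub pos = -1 ↔ ∀ j : Nat, pos ≤ (j : Int) → ¬ sub <+: s.drop j := by
  lift pos to ℕ using h0 with k
  rw [PySem.Chars.findFrom_natCast_eq_neg_one_iff s sub k (by exact_mod_cast hlen)]
  rw [← PySem.Chars.isIn_iff_infix, ← PySem.Chars.exists_prefix_drop_iff_isIn]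
  constructor
  · intro h j hj hpre
    exact h ⟨j - k, by rwa [List.drop_drop, Nat.add_sub_cancel' (show k ≤ j by exact_mod_cast hj)]⟩
  · rintro h ⟨j', hj'⟩
    rw [List.drop_drop] at hj'
    exact h (k + j') (by exact_mod_cast Nat.le_add_right k j') hj'

lemma pv_findFrom_spec (s sub : List Char) (pos : Int) (h0 : 0 ≤ pos) (hlen : pos ≤ (s.length : Int))
    (h : PySem.Chars.findFrom s sub pos ≠ -1) :
    pos ≤ PySem.Chars.findFrom s sub pos ∧ sub <+: s.drop (PySem.Chars.findFrom s sub pos).toNat ∧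
      ∀ i : Nat, pos ≤ (i : Int) → i < (PySem.Chars.findFrom s sub pos).toNat → ¬ sub <+: s.drop i := by
  lift pos to ℕ using h0 with k
  obtain ⟨h1, h2, h3⟩ := PySem.Chars.findFrom_natCast_spec s sub k (by exact_mod_cast hlen) h
  exact ⟨h1, h2, fun i hi hlt => h3 i (by exact_mod_cast hi) hlt⟩

lemma pv_evts_lt (s : List Char) (evts : List (Int × Bool)) (hsuf : evts <:+ pvEvents s)
    (e : Int × Bool) (he : e ∈ evts) : e.1 < (s.length : Int) := by
  have hmem := hsuf.subset he
  obtain ⟨p, k⟩ := e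
  obtain ⟨j, hj, hjlt, _⟩ := (pv_mem_events s p k).1 hmem
  simp at hj ⊢
  omega

lemma pv_main (s : List Char) (fuel : Nat) :
    ∀ (pos depth b : Int) (evts : List (Int × Bool)),
    0 ≤ pos → (s.length : Int) ≤ pos + fuel →
    evts <:+ pvEvents s →
    (∀ e ∈ pvEvents s, pos ≤ e.1 → e ∈ evts) →
    b ≤ pos →
    pvLoopA s fuel pos depth = pvLoopB ((pvGts s).dropWhile (fun g => g < b)) pos depth evts := by
  induction fuel with
  | zero =>
    intro pos depth b evts h0 hfuel hsuf hcomp hb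
    rw [show pvLoopA s 0 pos depth = none from rfl]
    refine (pv_loopB_none evts _ pos depth ?_).symm
    intro e he _
    have := pv_evts_lt s evts hsuf e he
    omega
  | succ fuel ih =>
    intro pos depth b evts h0 hfuel hsuf hcomp hb
    by_cases hpos : pos < (s.length : Int)
    case neg =>
      simp only [pvLoopA, if_neg hpos]
      refine (pv_loopB_none evts _ pos depth ?_).symm
      intro e he _
      have := pv_evts_lt s evts hsuf e he
      omega
    case pos =>
    rw [pv_loopB_skip]
    have hEsuf : evts.dropWhile (fun e => e.1 < pos) <:+ pvEvents s :=
      (List.dropWhile_suffix _).trans hsuf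
    have hEcomp : ∀ e ∈ pvEvents s, pos ≤ e.1 → e ∈ evts.dropWhile (fun e => e.1 < pos) := by
      intro e he hpe
      exact pv_mem_dropWhile _ _ _ (hcomp e he hpe) (by simp; omega)
    cases hEcase : evts.dropWhile (fun e => e.1 < pos) with
    | nil =>
      have hnc : PySem.Chars.findFrom s pvCloseTag pos = -1 := by
        rw [pv_findFrom_none s pvCloseTag pos h0 hpos.le]
        intro j hj hpre
        have hmem : ((j : Int), true) ∈ pvEvents s :=
          (pv_mem_events s j true).2 ⟨j, rfl, by have := pv_PvC_lt s j hpre; omega, Or.inl ⟨rfl, hpre⟩⟩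
        have := hEcomp _ hmem hj
        rw [hEcase] at this
        cases this
      simp only [pvLoopA, if_pos hpos, if_pos hnc]
      rfl
    | cons e rest =>
      obtain ⟨p, c⟩ := e
      have hppos : pos ≤ p := by
        have := pv_head_dropWhile _ _ _ _ hEcase
        simp at this
        omega
      have hpE : (p, c) ∈ pvEvents s := hEsuf.subset (hEcase ▸ List.mem_cons_self)
      obtain ⟨jp, hjp, hjplt, hkind⟩ := (pv_mem_events s p c).1 hpE
      have hEsorted : (evts.dropWhile (fun e => e.1 < pos)).Pairwise (fun a b => a.1 < b.1) :=
        (pv_events_sorted s).sublist hEsuf.sublist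
      have hrest_lt : ∀ e' ∈ rest, p < e'.1 := by
        rw [hEcase] at hEsorted
        exact (List.pairwise_cons.1 hEsorted).1
      have hmin : ∀ e' ∈ evts.dropWhile (fun e => e.1 < pos), p ≤ e'.1 := by
        intro e' he'
        rw [hEcase] at he'
        rcases List.mem_cons.1 he' with rfl | h
        · exact le_refl _
        · exact (hrest_lt e' h).le
      have hrest_suf : rest <:+ pvEvents s :=
        List.IsSuffix.trans (List.suffix_cons (p, c) rest) (hEcase ▸ hEsuf)
      have hrest_comp : ∀ (q : Int), p < q → ∀ e ∈ pvEvents s, q ≤ e.1 → e ∈ rest := by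
        intro q hq e he hqe
        have := hEcomp e he (by omega)
        rw [hEcase] at this
        rcases List.mem_cons.1 this with rfl | h
        · exfalso; simp at hqe; omega
        · exact h
      cases c with
      | true =>
        rcases hkind with ⟨_, hc⟩ | ⟨hfalse, _⟩
        swap
        · exact absurd hfalse (by simp)
        simp only [pvLoopA, if_pos hpos]
        have hnc_ne : ¬ (PySem.Chars.findFrom s pvCloseTag pos = -1) := fun hn =>
          (pv_findFrom_none s pvCloseTag pos h0 hpos.le).1 hn jp (by omega) hc
        obtain ⟨hr1, hr2, hr3⟩ := pv_findFrom_spec s pvCloseTag pos h0 hpos.le hnc_ne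
        set r := PySem.Chars.findFrom s pvCloseTag pos with hrdef
        have hr0 : 0 ≤ r := le_trans h0 hr1
        have hrlen := pv_PvC_lt s r.toNat hr2
        have hr_mem : ((r.toNat : Int), true) ∈ pvEvents s :=
          (pv_mem_events s _ true).2 ⟨r.toNat, rfl, by omega, Or.inl ⟨rfl, hr2⟩⟩
        have hrE := hEcomp _ hr_mem (by omega)
        have hple : p ≤ (r.toNat : Int) := hmin _ hrE
        have hrlep : r ≤ p := by
          by_contra hcon
          exact hr3 jp (by omega) (by omega) hc
        have hrp : r = p := by omega
        have huse : (PySem.Chars.findFrom s pvOpenTag pos = -1 ∨ r < PySem.Chars.findFrom s pvOpenTag pos) := by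
          by_cases hno : PySem.Chars.findFrom s pvOpenTag pos = -1
          · exact Or.inl hno
          · right
            obtain ⟨ho1, ho2, _⟩ := pv_findFrom_spec s pvOpenTag pos h0 hpos.le hno
            set q := PySem.Chars.findFrom s pvOpenTag pos with hqdef
            have hq0 : 0 ≤ q := le_trans h0 ho1
            have hqlen := pv_PvO_lt s q.toNat ho2
            have hq_mem : ((q.toNat : Int), false) ∈ pvEvents s :=
              (pv_mem_events s _ false).2
                ⟨q.toNat, rfl, by omega, Or.inr ⟨rfl, fun hcq => pv_not_PvC_PvO s q.toNat hcq ho2, ho2⟩⟩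
            have hqE := hEcomp _ hq_mem (by omega)
            have hpleq : p ≤ (q.toNat : Int) := hmin _ hqE
            have hne : p ≠ (q.toNat : Int) := by
              intro hpq
              have hjq : jp = q.toNat := by omega
              exact pv_not_PvC_PvO s q.toNat (hjq ▸ hc) ho2
            omega
        rw [if_neg hnc_ne, if_pos huse, hrp]
        have hB : pvLoopB ((pvGts s).dropWhile (fun g => g < b)) pos depth ((p, true) :: rest) =
            if depth - 1 = 0 then some p
            else pvLoopB ((pvGts s).dropWhile (fun g => g < b)) (p + 6) (depth - 1) rest := by
          simp only [pvLoopB, if_neg (by omega : ¬ p < pos)]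
          simp
        rw [hB]
        by_cases hd : depth - 1 = 0
        · simp only [if_pos hd]
        · simp only [if_neg hd]
          exact ih (p + 6) (depth - 1) b rest (by omega) (by omega) hrest_suf
            (hrest_comp (p + 6) (by omega)) (by omega)
      | false =>
        rcases hkind with ⟨htrue, _⟩ | ⟨_, hncp, ho⟩
        · exact absurd htrue (by simp)
        simp only [pvLoopA, if_pos hpos]
        have hno_ne : ¬ (PySem.Chars.findFrom s pvOpenTag pos = -1) := fun hn =>
          (pv_findFrom_none s pvOpenTag pos h0 hpos.le).1 hn jp (by omega) ho
        obtain ⟨hq1, hq2, hq3⟩ := pv_findFrom_spec s pvOpenTag pos h0 hpos.le hno_ne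
        set q := PySem.Chars.findFrom s pvOpenTag pos with hqdef
        have hq0 : 0 ≤ q := le_trans h0 hq1
        have hqlen := pv_PvO_lt s q.toNat hq2
        have hq_mem : ((q.toNat : Int), false) ∈ pvEvents s :=
          (pv_mem_events s _ false).2
            ⟨q.toNat, rfl, by omega, Or.inr ⟨rfl, fun hcq => pv_not_PvC_PvO s q.toNat hcq hq2, hq2⟩⟩
        have hqE := hEcomp _ hq_mem (by omega)
        have hpleq : p ≤ (q.toNat : Int) := hmin _ hqE
        have hqlep : q ≤ p := by
          by_contra hcon
          exact hq3 jp (by omega) (by omega) ho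
        have hqp : q = p := by omega
        by_cases hnc : PySem.Chars.findFrom s pvCloseTag pos = -1
        · rw [if_pos hnc]
          refine (pv_loopB_none _ _ pos depth ?_).symm
          intro e he hce
          obtain ⟨pe, ke⟩ := e
          by_contra hcon
          obtain ⟨je, hje, hjelt, hkinde⟩ := (pv_mem_events s pe ke).1 (hEsuf.subset (hEcase ▸ he))
          simp at hce
          rcases hkinde with ⟨_, hcc⟩ | ⟨hkf, _⟩
          · exact (pv_findFrom_none s pvCloseTag pos h0 hpos.le).1 hnc je
              (by simp at hcon ⊢; omega) hcc
          · rw [hce] at hkf; exact absurd hkf (by simp)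
        · obtain ⟨hr1, hr2, hr3⟩ := pv_findFrom_spec s pvCloseTag pos h0 hpos.le hnc
          set r := PySem.Chars.findFrom s pvCloseTag pos with hrdef
          have hr0 : 0 ≤ r := le_trans h0 hr1
          have hrlen := pv_PvC_lt s r.toNat hr2
          have hr_mem : ((r.toNat : Int), true) ∈ pvEvents s :=
            (pv_mem_events s _ true).2 ⟨r.toNat, rfl, by omega, Or.inl ⟨rfl, hr2⟩⟩
          have hrE := hEcomp _ hr_mem (by omega)
          have hpler : p ≤ (r.toNat : Int) := hmin _ hrE
          have hner : p ≠ (r.toNat : Int) := by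
            intro hpr
            have hjr : jp = r.toNat := by omega
            exact hncp (hjr ▸ hr2)
          have hplr : p < r := by omega
          have huse_false : ¬ (q = -1 ∨ r < q) := by
            rintro (h1 | h2)
            · exact hno_ne h1
            · omega
          have hguard : q + 5 ≤ (s.length : Int) ∧
              PySem.List.slice s (some q) (some (q + 5)) ≠ "</div".toList := by
            refine ⟨by omega, ?_⟩
            have := pv_guard s q.toNat hq2
            have hcast : ((q.toNat : Int)) = q := by omega
            rwa [hcast] at this
          rw [if_neg hnc, if_neg huse_false, if_pos hguard]
          have hB : pvLoopB ((pvGts s).dropWhile (fun g => g < b)) pos depth ((p, false) :: rest) =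
              pvLoopB ((pvGts s).dropWhile (fun g => g < p))
                (match (pvGts s).dropWhile (fun g => g < p) with
                  | g :: _ => g + 1
                  | [] => p + 5)
                (depth + 1) rest := by
            simp only [pvLoopB, if_neg (by omega : ¬ p < pos),
              if_neg (by simp : ¬ (false = true))]
            rw [pv_dropWhile_dropWhile _ _ _ (by omega : b ≤ p)]
          rw [hB, hqp]
          by_cases hg : PySem.Chars.findFrom s ['>'] p = -1
          · have hgnil : (pvGts s).dropWhile (fun g => g < p) = [] := by
              cases hgg : (pvGts s).dropWhile (fun g => g < p) with
              | nil => rfl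
              | cons g t =>
                exfalso
                have hgmem : g ∈ pvGts s := (List.dropWhile_suffix _).subset (hgg ▸ List.mem_cons_self)
                obtain ⟨jg, hjg, hjglt, hPg⟩ := (pv_mem_gts s g).1 hgmem
                have hgep : ¬ (g < p) := by
                  have := pv_head_dropWhile _ _ _ _ hgg
                  simpa using this
                exact (pv_findFrom_none s ['>'] p (by omega) (by omega)).1 hg jg (by omega) hPg
            rw [if_neg (not_not_intro hg), hgnil]
            have hstep := ih (p + 5) (depth + 1) p rest (by omega) (by omega) hrest_suf
              (hrest_comp (p + 5) (by omega)) (by omega)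
            rw [hgnil] at hstep
            exact hstep
          · obtain ⟨hg1, hg2, hg3⟩ := pv_findFrom_spec s ['>'] p (by omega) (by omega) hg
            set ga := PySem.Chars.findFrom s ['>'] p with hgadef
            have hga0 : 0 ≤ ga := by omega
            have hgalen := pv_PvG_lt s ga.toNat hg2
            have hgamem : ((ga.toNat : Int)) ∈ pvGts s := (pv_mem_gts s _).2 ⟨ga.toNat, rfl, by omega, hg2⟩
            have hgadrop : ((ga.toNat : Int)) ∈ (pvGts s).dropWhile (fun g => g < p) :=
              pv_mem_dropWhile _ _ _ hgamem (by simp; omega)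
            cases hgg : (pvGts s).dropWhile (fun g => g < p) with
            | nil =>
              rw [hgg] at hgadrop
              cases hgadrop
            | cons g t =>
              have hgmem : g ∈ pvGts s := (List.dropWhile_suffix _).subset (hgg ▸ List.mem_cons_self)
              obtain ⟨jg, hjg, hjglt, hPg⟩ := (pv_mem_gts s g).1 hgmem
              have hgep : ¬ (g < p) := by
                have := pv_head_dropWhile _ _ _ _ hgg
                simpa using this
              have hle1 : ga ≤ g := by
                by_contra hcon
                exact hg3 jg (by omega) (by omega) hPg
              have hle2 : g ≤ (ga.toNat : Int) := by
                rw [hgg] at hgadrop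
                rcases List.mem_cons.1 hgadrop with h | h
                · omega
                · have hsor : (g :: t).Pairwise (fun a b => a < b) :=
                    hgg ▸ ((pv_gts_sorted s).sublist (List.dropWhile_suffix _).sublist)
                  exact ((List.pairwise_cons.1 hsor).1 _ h).le
              have hgag : g = ga := by omega
              rw [if_pos hg]
              have hstep := ih (ga + 1) (depth + 1) p rest (by omega) (by omega) hrest_suf
                (hrest_comp (ga + 1) (by omega)) (by omega)
              rw [hgg] at hstep
              rw [hstep, hgag]

-- ===== VERDICT (by name: the statement is the Claim_ definition above) =====
theorem get_lyrics_block_bounds_spec : Claim_equal_get_lyrics_block_bounds := by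
  intro html _
  unfold Spec_get_lyrics_block_bounds get_lyrics_block_bounds get_lyrics_block_bounds_alt
  rw [show ("id=\"lyricsPolish\">".toList) = pvMarker from rfl]
  by_cases hf : PySem.Chars.find html.toList pvMarker = -1
  · rw [if_pos hf, if_pos hf]
  · rw [if_neg hf, if_neg hf]
    have hf0 : 0 ≤ PySem.Chars.find html.toList pvMarker := by
      have := PySem.Chars.neg_one_le_find html.toList pvMarker
      omega
    refine Prod.ext rfl ?_
    have hgts : (pvGts html.toList).dropWhile (fun g => g < (0 : Int)) = pvGts html.toList := by
      cases hgg : pvGts html.toList with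
      | nil => rfl
      | cons g t =>
        rw [List.dropWhile_cons]
        have hmem : g ∈ pvGts html.toList := hgg ▸ List.mem_cons_self
        obtain ⟨jg, rfl, _, _⟩ := (pv_mem_gts html.toList g).1 hmem
        rw [if_neg (by simp)]
    have hmain := pv_main html.toList (html.toList.length + 1)
      (PySem.Chars.find html.toList pvMarker + 18) 1 0 (pvEvents html.toList)
      (by omega) (by push_cast; omega) (List.suffix_refl _) (fun e he _ => he) (by omega)
    rw [hgts] at hmain
    exact hmain
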